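-- pv_equiv track=rewrite | github.com/leetonidas/mbins | gen_checker.py | combine_list
-- ===== SOURCE A (Python) =====
-- def combine_list(lst):
--     res = []
--     cur = None
--     last = []
--     for idx, tar in lst:
--         if cur is None:
--             cur = idx
--             last = [tar]
--             continue
--
--         if cur == idx - 1:
--             cur = idx
--             last.append(tar)
--             if len(last) < 4:
--                 continue
--             res.append((cur + 1 - len(last), last))
--             cur = None
--             last = []
--         else:
--             res.append((cur + 1 - len(last), last))
--             cur = idx
--             last = [tar]
--     if cur is not None:
--         res.append((cur + 1 - len(last), last))
--     return res
-- ===== SOURCE B (Python) =====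
-- def combine_list(lst):
--     # phase 1: collect maximal runs of consecutive indices as (start, tars)
--     runs = []
--     i = 0
--     n = len(lst)
--     while i < n:
--         start = lst[i][0]
--         tars = [lst[i][1]]
--         i += 1
--         while i < n and lst[i][0] == start + len(tars):
--             tars.append(lst[i][1])
--             i += 1
--         runs.append((start, tars))
--     # phase 2: split each run into chunks of at most 4
--     res = []
--     for start, tars in runs:
--         while len(tars) > 4:
--             res.append((start, tars[:4]))
--             start += 4
--             tars = tars[4:]
--         res.append((start, tars))
--     return res
-- ===== Notes on version B (the rewrite author's own statement) =====
-- stated objective: alternative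
-- what changed: A interleaves grouping and capping in one stateful loop that flushes and resets whenever a group reaches 4; B first collects maximal runs of consecutive indices, then splits each run into chunks of at most 4 in a separate phase.
import Mathlib
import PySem

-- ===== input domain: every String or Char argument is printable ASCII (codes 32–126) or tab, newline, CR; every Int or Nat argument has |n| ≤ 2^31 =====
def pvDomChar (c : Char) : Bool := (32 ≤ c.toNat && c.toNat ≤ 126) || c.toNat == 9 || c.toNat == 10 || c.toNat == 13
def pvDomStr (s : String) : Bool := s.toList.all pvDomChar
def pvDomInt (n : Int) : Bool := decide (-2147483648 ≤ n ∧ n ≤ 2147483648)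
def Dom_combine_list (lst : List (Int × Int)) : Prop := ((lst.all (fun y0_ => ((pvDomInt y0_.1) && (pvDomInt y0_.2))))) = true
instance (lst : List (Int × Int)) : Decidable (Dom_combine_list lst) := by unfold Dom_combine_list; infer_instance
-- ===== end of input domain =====

-- B replaces A's single stateful flush-at-4 loop by two phases: collect maximal
-- consecutive-index runs, then split each run into chunks of at most 4 (alternative
-- decomposition, same cost).

-- ===== PORT A =====
-- one step of A's for-loop over state (res, cur, last)
def pvStepA (st : List (Int × List Int) × Option Int × List Int) (p : Int × Int) :
    List (Int × List Int) × Option Int × List Int :=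
  match st, p with
  | (res, none, _), (idx, tar) => (res, some idx, [tar])
  | (res, some cur, last), (idx, tar) =>
    if cur = idx - 1 then
      let last' := last ++ [tar]
      if last'.length < 4 then (res, some idx, last')
      else (res ++ [(idx + 1 - (last'.length : Int), last')], none, [])
    else (res ++ [(cur + 1 - (last.length : Int), last)], some idx, [tar])

-- A's trailing 'if cur is not None' flush
def pvFinishA (st : List (Int × List Int) × Option Int × List Int) : List (Int × List Int) :=
  match st with
  | (res, none, _) => res
  | (res, some cur, last) => res ++ [(cur + 1 - (last.length : Int), last)]

def combine_list (lst : List (Int × Int)) : List (Int × List Int) :=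
  pvFinishA (lst.foldl pvStepA ([], none, []))

-- ===== PORT B =====
-- inner while of phase 1: take the continuation of a run whose next expected index is start+k
def pvTakeRun (start : Int) (k : Nat) : List (Int × Int) → List Int × List (Int × Int)
  | [] => ([], [])
  | (idx, tar) :: rest =>
    if idx = start + (k : Int) then
      ((tar :: (pvTakeRun start (k+1) rest).1), (pvTakeRun start (k+1) rest).2)
    else ([], (idx, tar) :: rest)

lemma pvTakeRun_rem_le (start : Int) : ∀ (l : List (Int × Int)) (k : Nat),
    (pvTakeRun start k l).2.length ≤ l.length := by
  intro l
  induction l with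
  | nil => intro k; simp [pvTakeRun]
  | cons p rest ih =>
    intro k
    obtain ⟨idx, tar⟩ := p
    by_cases h : idx = start + (k : Int)
    · simpa [pvTakeRun, h] using Nat.le_succ_of_le (ih (k+1))
    · simp [pvTakeRun, h]

-- phase 1: maximal runs of consecutive indices
def pvRuns : List (Int × Int) → List (Int × List Int)
  | [] => []
  | (idx, tar) :: rest =>
    (idx, tar :: (pvTakeRun idx 1 rest).1) :: pvRuns (pvTakeRun idx 1 rest).2
  termination_by l => l.length
  decreasing_by
    exact Nat.lt_succ_of_le (pvTakeRun_rem_le idx rest 1)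

-- phase 2: split one run's tar list into chunks of at most 4
def pvChunk4 (start : Int) (tars : List Int) : List (Int × List Int) :=
  if 4 < tars.length then
    (start, tars.take 4) :: pvChunk4 (start + 4) (tars.drop 4)
  else [(start, tars)]
  termination_by tars.length
  decreasing_by simp; omega

def combine_list_alt (lst : List (Int × Int)) : List (Int × List Int) :=
  (pvRuns lst).flatMap (fun p => pvChunk4 p.1 p.2)

-- ===== PRECONDITION & SPEC =====
def Spec_combine_list (lst : List (Int × Int)) (out : List (Int × List Int)) : Prop := out = combine_list_alt lst
instance (lst : List (Int × Int)) (out : List (Int × List Int)) : Decidable (Spec_combine_list lst out) := by unfold Spec_combine_list; infer_instance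

-- ===== CLAIM (what is proved, stated in full; the proofs are below) =====
def Claim_equal_combine_list : Prop := ∀ (lst : List (Int × Int)), Dom_combine_list lst → Spec_combine_list lst (combine_list lst)

-- ===== LEMMAS AND PROOFS =====

lemma pvTakeRun_shift : ∀ (l : List (Int × Int)) (s : Int) (k : Nat) (s' : Int) (k' : Nat),
    s + (k : Int) = s' + (k' : Int) → pvTakeRun s k l = pvTakeRun s' k' l := by
  intro l
  induction l with
  | nil => intro s k s' k' _; simp [pvTakeRun]
  | cons p rest ih =>
    intro s k s' k' h
    obtain ⟨idx, tar⟩ := p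
    have hrec : pvTakeRun s (k+1) rest = pvTakeRun s' (k'+1) rest := by
      apply ih; push_cast; omega
    by_cases hc : idx = s + (k : Int)
    · have hc' : idx = s' + (k' : Int) := by omega
      simp [pvTakeRun, hc, hrec, h]
    · have hc' : ¬ idx = s' + (k' : Int) := by omega
      simp [pvTakeRun, hc, hc']

lemma pvChunk4_small (s : Int) (tars : List Int) (h : tars.length ≤ 4) :
    pvChunk4 s tars = [(s, tars)] := by
  rw [pvChunk4]; simp [Nat.not_lt.mpr h]

lemma pvChunk4_step (s : Int) (tars ts : List Int) (h : tars.length = 4) (hts : ts ≠ []) :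
    pvChunk4 s (tars ++ ts) = (s, tars) :: pvChunk4 (s + 4) ts := by
  rw [pvChunk4]
  have hlen : 4 < (tars ++ ts).length := by
    simp [h]; exact List.length_pos_iff.mpr hts
  have htake : (tars ++ ts).take 4 = tars := by
    rw [← h]; simp
  have hdrop : (tars ++ ts).drop 4 = ts := by
    rw [← h]; simp
  rw [if_pos hlen, htake, hdrop]

-- key decomposition: after A flushes a full group of 4 at 'start', the rest of B's
-- chunking of the same maximal run lines up with restarting B on the remaining input
lemma pvFlush_decomp (rest : List (Int × Int)) (start : Int) (L : List Int) (hL : L.length = 4) :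
    pvChunk4 start (L ++ (pvTakeRun start 4 rest).1)
      ++ ((pvRuns (pvTakeRun start 4 rest).2).flatMap fun p => pvChunk4 p.1 p.2)
    = (start, L) :: combine_list_alt rest := by
  cases rest with
  | nil =>
    simp [pvTakeRun, pvRuns, combine_list_alt, pvChunk4_small start L (by omega)]
  | cons q rest'' =>
    obtain ⟨idx', t'⟩ := q
    by_cases h : idx' = start + (4 : Int)
    · have hshift : pvTakeRun start 5 rest'' = pvTakeRun idx' 1 rest'' := by
        apply pvTakeRun_shift; push_cast; omega
      have htr : pvTakeRun start 4 ((idx', t') :: rest'')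
          = (t' :: (pvTakeRun idx' 1 rest'').1, (pvTakeRun idx' 1 rest'').2) := by
        rw [pvTakeRun]
        norm_num [h, hshift]
      rw [htr]
      rw [pvChunk4_step start L (t' :: (pvTakeRun idx' 1 rest'').1) hL (by simp)]
      rw [combine_list_alt, pvRuns]
      simp [h]
    · have htr : pvTakeRun start 4 ((idx', t') :: rest'') = ([], (idx', t') :: rest'') := by
        rw [pvTakeRun]; norm_num [h]
      rw [htr]
      simp only [List.append_nil]
      rw [pvChunk4_small start L (by omega)]
      simp [combine_list_alt]

-- the two invariant statements about A's fold
def pvSomeP (l : List (Int × Int)) : Prop :=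
  ∀ (res : List (Int × List Int)) (start : Int) (last : List Int) (k : Nat),
    last.length = k → 1 ≤ k → k ≤ 3 →
    pvFinishA (l.foldl pvStepA (res, some (start + (k : Int) - 1), last))
      = res ++ pvChunk4 start (last ++ (pvTakeRun start k l).1)
            ++ ((pvRuns (pvTakeRun start k l).2).flatMap fun p => pvChunk4 p.1 p.2)

def pvNoneP (l : List (Int × Int)) : Prop :=
  ∀ (res : List (Int × List Int)) (last : List Int),
    pvFinishA (l.foldl pvStepA (res, none, last)) = res ++ combine_list_alt l

lemma pvMain : ∀ (n : Nat) (l : List (Int × Int)), l.length ≤ n → pvSomeP l ∧ pvNoneP l := by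
  intro n
  induction n with
  | zero =>
    intro l hl
    have : l = [] := List.length_eq_zero_iff.mp (Nat.le_zero.mp hl)
    subst this
    constructor
    · intro res start last k hk h1 h3
      simp only [List.foldl, pvTakeRun, pvRuns, pvFinishA, List.flatMap]
      rw [pvChunk4_small start (last ++ []) (by simp only [List.append_nil, hk]; omega)]
      simp [hk]
    · intro res last
      simp [pvFinishA, combine_list_alt, pvRuns]
  | succ n ih =>
    intro l hl
    constructor
    · -- pvSomeP
      intro res start last k hk h1 h3
      cases l with
      | nil =>
        simp only [List.foldl, pvTakeRun, pvRuns, pvFinishA, List.flatMap]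
        rw [pvChunk4_small start (last ++ []) (by simp only [List.append_nil, hk]; omega)]
        simp [hk]
      | cons p rest =>
        obtain ⟨idx, tar⟩ := p
        have hrest : rest.length ≤ n := by simpa using hl
        subst hk
        by_cases hc : idx = start + (last.length : Int)
        · -- run continues
          have hcond : start + (last.length : Int) - 1 = idx - 1 := by omega
          have htr : pvTakeRun start last.length ((idx, tar) :: rest)
              = (tar :: (pvTakeRun start (last.length + 1) rest).1,
                 (pvTakeRun start (last.length + 1) rest).2) := by
            rw [pvTakeRun]; simp [hc]
          by_cases h4 : last.length + 1 < 4
          · -- still below 4: keep accumulating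
            have hlen' : (last ++ [tar]).length < 4 := by simp; omega
            have hstep : List.foldl pvStepA (res, some (start + (last.length : Int) - 1), last) ((idx,tar)::rest)
                = List.foldl pvStepA (res, some idx, last ++ [tar]) rest := by
              simp only [List.foldl_cons, pvStepA, if_pos hcond, if_pos hlen']
            have hsome := (ih rest hrest).1 res start (last ++ [tar]) (last ++ [tar]).length
              rfl (by simp) (by simp; omega)
            have hidx : start + ((last ++ [tar]).length : Int) - 1 = idx := by
              simp; omega
            rw [hidx] at hsome
            rw [hstep, hsome, htr]
            simp
          · -- flush at 4 (last.length = 3)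
            have hk3 : last.length = 3 := by omega
            have hlen' : ¬ (last ++ [tar]).length < 4 := by simp; omega
            have hval : idx + 1 - ((last ++ [tar]).length : Int) = start := by
              simp; omega
            have hstep : List.foldl pvStepA (res, some (start + (last.length : Int) - 1), last) ((idx,tar)::rest)
                = List.foldl pvStepA (res ++ [(start, last ++ [tar])], none, []) rest := by
              simp only [List.foldl_cons, pvStepA, if_pos hcond, if_neg hlen', hval]
            have hnone := (ih rest hrest).2 (res ++ [(start, last ++ [tar])]) []
            have hdec := pvFlush_decomp rest start (last ++ [tar]) (by simp [hk3])
            have htr4 : pvTakeRun start (last.length + 1) rest = pvTakeRun start 4 rest := by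
              rw [hk3]
            rw [hstep, hnone, htr, htr4]
            rw [show last ++ tar :: (pvTakeRun start 4 rest).1
                  = (last ++ [tar]) ++ (pvTakeRun start 4 rest).1 by simp]
            simp only [List.append_assoc, List.singleton_append] at hdec
            simp [hdec]
        · -- run boundary: A flushes the pending group and starts over at idx
          have hcond : ¬ (start + (last.length : Int) - 1 = idx - 1) := by omega
          have hval : start + (last.length : Int) - 1 + 1 - (last.length : Int) = start := by ring
          have hstep : List.foldl pvStepA (res, some (start + (last.length : Int) - 1), last) ((idx,tar)::rest)
              = List.foldl pvStepA (res ++ [(start, last)], some idx, [tar]) rest := by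
            simp only [List.foldl_cons, pvStepA, if_neg hcond, hval]
          have hsome := (ih rest hrest).1 (res ++ [(start, last)]) idx [tar] 1
            (by simp) (by omega) (by omega)
          norm_num at hsome
          have htr : pvTakeRun start last.length ((idx, tar) :: rest) = ([], (idx, tar) :: rest) := by
            rw [pvTakeRun]; simp [hc]
          rw [hstep, hsome, htr, pvRuns]
          rw [pvChunk4_small start (last ++ []) (by simp; omega)]
          simp
    · -- pvNoneP
      intro res last
      cases l with
      | nil => simp [pvFinishA, combine_list_alt, pvRuns]
      | cons p rest =>
        obtain ⟨idx, tar⟩ := p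
        have hrest : rest.length ≤ n := by simpa using hl
        have hsome := (ih rest hrest).1 res idx [tar] 1 (by simp) (by omega) (by omega)
        have : List.foldl pvStepA (res, none, last) ((idx,tar)::rest)
            = List.foldl pvStepA (res, some idx, [tar]) rest := by
          simp [List.foldl, pvStepA]
        norm_num at hsome
        rw [this, hsome, combine_list_alt, pvRuns]
        simp

-- ===== VERDICT (by name: the statement is the Claim_ definition above) =====
theorem combine_list_spec : Claim_equal_combine_list := by
  intro lst _
  unfold Spec_combine_list combine_list
  have h := (pvMain lst.length lst (le_refl _)).2 [] []
  simpa using h
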